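-- pv_equiv track=rewrite | github.com/E-Ghandour-CodeAcademy/MayTest | exam/task-10/main.py | generate_hangman_phrase
-- ===== SOURCE A (Python) =====
-- def generate_hangman_phrase(phrase, guessed_letters):
--     result = ""
--     for char in phrase:
--         if char.isalpha():
--             if char.lower() in guessed_letters:
--                 result += char
--             else:
--                 result += "-"
--         else:
--             result += char
--
--     return result
-- ===== SOURCE B (Python) =====
-- def generate_hangman_phrase(phrase, guessed_letters):
--     table = {ord(c): "-" for c in set(phrase)
--              if c.isalpha() and c.lower() not in guessed_letters}
--     return phrase.translate(table)
-- ===== Notes on version B (the rewrite author's own statement) =====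
-- stated objective: faster
-- what changed: Replaces the per-character decide-and-concatenate loop with a codepoint translation table built once over the distinct characters of the phrase, then one bulk str.translate call (C-level transform).
import Mathlib
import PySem

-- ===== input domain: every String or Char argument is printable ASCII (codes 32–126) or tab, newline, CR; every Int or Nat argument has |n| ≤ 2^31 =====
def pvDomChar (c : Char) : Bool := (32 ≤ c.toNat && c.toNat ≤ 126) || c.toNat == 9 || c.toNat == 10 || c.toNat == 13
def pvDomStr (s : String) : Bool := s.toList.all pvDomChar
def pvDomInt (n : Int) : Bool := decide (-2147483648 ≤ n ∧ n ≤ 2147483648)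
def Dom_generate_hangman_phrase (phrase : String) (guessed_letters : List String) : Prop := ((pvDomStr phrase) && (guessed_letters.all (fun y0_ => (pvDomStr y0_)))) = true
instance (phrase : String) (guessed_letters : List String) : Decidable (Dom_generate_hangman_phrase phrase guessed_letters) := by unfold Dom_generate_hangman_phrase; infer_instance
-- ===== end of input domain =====

-- B builds a translation table over the distinct characters of the phrase once, then
-- applies it in one bulk pass (Python str.translate); same return value as A.

-- ===== PORT A =====
-- per-character loop accumulating a result string
def generate_hangman_phrase (phrase : String) (guessed_letters : List String) : String :=
  phrase.toList.foldl (fun result c =>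
    if PySem.Chars.isalpha c then
      if guessed_letters.contains (String.ofList [PySem.Chars.lowerChar c]) then
        result ++ String.ofList [c]
      else
        result ++ "-"
    else
      result ++ String.ofList [c]) ""

-- ===== PORT B =====
-- table = {ord(c): "-" for c in set(phrase) if c.isalpha() and c.lower() not in guessed_letters}
-- (keyed here by the Char itself — ASCII codepoints are in bijection with the chars);
-- the dict is only looked up afterwards, so building it along the Set's order is exact.
def hangmanTable (phrase : String) (guessed_letters : List String) : PySem.Dict Char String :=
  ((PySem.Set.ofList phrase.toList).filter (fun c =>
      PySem.Chars.isalpha c &&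
      !(guessed_letters.contains (String.ofList [PySem.Chars.lowerChar c])))).foldl
    (fun d c => d.insert c "-") PySem.Dict.empty

-- phrase.translate(table): each char is replaced by its table entry, or kept if absent
def generate_hangman_phrase_alt (phrase : String) (guessed_letters : List String) : String :=
  let table := hangmanTable phrase guessed_letters
  String.ofList ((phrase.toList.map (fun c => ((table.get? c).getD (String.ofList [c])).toList)).flatten)

-- ===== PRECONDITION & SPEC =====
def Spec_generate_hangman_phrase (phrase : String) (guessed_letters : List String) (out : String) : Prop := out = generate_hangman_phrase_alt phrase guessed_letters
instance (phrase : String) (guessed_letters : List String) (out : String) : Decidable (Spec_generate_hangman_phrase phrase guessed_letters out) := by unfold Spec_generate_hangman_phrase; infer_instance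

-- ===== CLAIM (what is proved, stated in full; the proofs are below) =====
def Claim_equal_generate_hangman_phrase : Prop := ∀ (phrase : String) (guessed_letters : List String), Dom_generate_hangman_phrase phrase guessed_letters → Spec_generate_hangman_phrase phrase guessed_letters (generate_hangman_phrase phrase guessed_letters)

-- ===== LEMMAS AND PROOFS =====

-- the table built by repeated insert of "-" answers membership in the key list
theorem get?_foldl_insert_dash (l : List Char) (d : PySem.Dict Char String) (c : Char) :
    (l.foldl (fun d c => d.insert c "-") d).get? c
      = if c ∈ l then some "-" else d.get? c := by
  induction l generalizing d with
  | nil => simp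
  | cons x xs ih =>
    simp only [List.foldl_cons, ih, List.mem_cons]
    by_cases hx : c = x
    · subst hx
      by_cases hm : c ∈ xs <;> simp [hm, PySem.Dict.get?_insert_self]
    · by_cases hm : c ∈ xs <;> simp [hm, hx, PySem.Dict.get?_insert_of_ne _ _ hx]

theorem hangmanTable_get? (phrase : String) (guessed_letters : List String) (c : Char) :
    (hangmanTable phrase guessed_letters).get? c
      = if c ∈ phrase.toList ∧ PySem.Chars.isalpha c = true ∧
            String.ofList [PySem.Chars.lowerChar c] ∉ guessed_letters
        then some "-" else none := by
  unfold hangmanTable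
  rw [get?_foldl_insert_dash]
  simp only [List.mem_filter, PySem.Set.mem_ofList, Bool.and_eq_true, Bool.not_eq_true',
    List.contains_eq_mem, decide_eq_false_iff_not, and_assoc]
  split <;> simp [PySem.Dict.empty, PySem.Dict.get?]

-- the per-character replacement A performs, as a list of chars
def maskChar (guessed_letters : List String) (c : Char) : List Char :=
  if PySem.Chars.isalpha c then
    if guessed_letters.contains (String.ofList [PySem.Chars.lowerChar c]) then [c] else ['-']
  else [c]

theorem maskString_cons (x : Char) (l : List Char) :
    String.ofList [x] ++ String.ofList l = String.ofList (x :: l) := by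
  rw [← String.ofList_append]; rfl

theorem dash_eq : ("-" : String) = String.ofList ['-'] := rfl

theorem dash_cons (l : List Char) :
    "-" ++ String.ofList l = String.ofList ('-' :: l) := by
  rw [dash_eq]; exact maskString_cons '-' l

theorem foldl_mask (guessed_letters : List String) (l : List Char) (acc : String) :
    l.foldl (fun result c =>
      if PySem.Chars.isalpha c then
        if guessed_letters.contains (String.ofList [PySem.Chars.lowerChar c]) then
          result ++ String.ofList [c]
        else
          result ++ "-"
      else
        result ++ String.ofList [c]) acc
    = acc ++ String.ofList (l.flatMap (maskChar guessed_letters)) := by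
  induction l generalizing acc with
  | nil => simp
  | cons x xs ih =>
    simp only [List.foldl_cons, ih, List.flatMap_cons, maskChar, dash_eq]
    by_cases h1 : PySem.Chars.isalpha x
    · by_cases h2 : String.ofList [PySem.Chars.lowerChar x] ∈ guessed_letters <;>
        simp [h1, h2, List.contains_eq_mem, String.append_assoc, maskString_cons, dash_cons]
    · simp [h1, String.append_assoc, maskString_cons, dash_cons]

-- ===== VERDICT (by name: the statement is the Claim_ definition above) =====
theorem generate_hangman_phrase_spec : Claim_equal_generate_hangman_phrase := by
  intro phrase guessed_letters _
  unfold Spec_generate_hangman_phrase generate_hangman_phrase generate_hangman_phrase_alt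
  rw [foldl_mask]
  show "" ++ _ = _
  simp only [String.empty_append]
  congr 1
  rw [List.flatMap]
  congr 1
  apply List.map_congr_left
  intro c hc
  rw [hangmanTable_get?]
  by_cases h1 : PySem.Chars.isalpha c
  · by_cases h2 : guessed_letters.contains (String.ofList [PySem.Chars.lowerChar c]) <;>
      simp_all [maskChar]
  · simp_all [maskChar]
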